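-- pv_equiv track=rewrite | github.com/HakierGrzonzo/healthHack | backend/ECG.py | getLeadsAsDF
-- ===== SOURCE A (Python) =====
-- def getLeadsAsDF(leads, dataFromDF):
--     leadsAsDF = []
--     for lead in leads:
--         if lead in dataFromDF['samples']:
--             leadsAsDF.append(dataFromDF['samples'][lead][5000:8000])
--         else:
--             return None
--     return leadsAsDF
-- ===== SOURCE B (Python) =====
-- def getLeadsAsDF(leads, dataFromDF):
--     # two passes: validate that every lead is present, then build the slices
--     if not all(lead in dataFromDF['samples'] for lead in leads):
--         return None
--     return [dataFromDF['samples'][lead][5000:8000] for lead in leads]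
-- ===== Notes on version B (the rewrite author's own statement) =====
-- stated objective: simpler
-- what changed: Replaces the single early-exit accumulator loop by a two-pass validate-then-build decomposition: an all() membership check over the leads, then a list comprehension mapping each lead to its slice.
import Mathlib
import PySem

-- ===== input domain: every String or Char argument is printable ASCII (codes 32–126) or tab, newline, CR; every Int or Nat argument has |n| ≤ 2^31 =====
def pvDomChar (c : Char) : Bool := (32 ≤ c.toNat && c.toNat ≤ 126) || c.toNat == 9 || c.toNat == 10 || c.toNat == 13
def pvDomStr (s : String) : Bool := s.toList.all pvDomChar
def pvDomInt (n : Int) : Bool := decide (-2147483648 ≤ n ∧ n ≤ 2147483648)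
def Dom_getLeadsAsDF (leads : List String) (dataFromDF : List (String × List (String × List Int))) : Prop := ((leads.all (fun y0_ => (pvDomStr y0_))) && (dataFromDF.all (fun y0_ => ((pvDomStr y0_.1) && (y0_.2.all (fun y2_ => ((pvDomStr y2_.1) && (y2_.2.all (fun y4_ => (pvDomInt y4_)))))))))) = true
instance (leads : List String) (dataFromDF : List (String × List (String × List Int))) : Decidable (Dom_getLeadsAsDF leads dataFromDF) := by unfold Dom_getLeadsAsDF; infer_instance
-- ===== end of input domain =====

-- B replaces A's single early-exit accumulator loop by a two-pass validate-then-build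
-- decomposition (check all leads present, then map each lead to its slice); objective: simpler.

-- shared primitive: dict lookup on an association list (first match), d[k] / 'k in d'
def assocGet? {ν : Type} (d : List (String × ν)) (k : String) : Option ν :=
  (d.find? (fun p => p.1 == k)).map (·.2)

-- ===== PORT A =====
-- A's loop: for each lead, look up dataFromDF['samples'], test membership, append the slice, else return None
def goA (dataFromDF : List (String × List (String × List Int))) :
    List String → List (List Int) → Option (List (List Int))
  | [], acc => some acc
  | lead :: rest, acc =>
    match assocGet? dataFromDF "samples" with
    | none => none   -- KeyError in Python: excluded by Pre_
    | some samples =>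
      match assocGet? samples lead with
      | some v => goA dataFromDF rest (acc ++ [PySem.List.slice v (some 5000) (some 8000)])
      | none => none

def getLeadsAsDF (leads : List String) (dataFromDF : List (String × List (String × List Int))) : Option (List (List Int)) :=
  goA dataFromDF leads []

-- ===== PORT B =====
-- B pass 1: all(lead in dataFromDF['samples'] for lead in leads)
def hasLead (dataFromDF : List (String × List (String × List Int))) (lead : String) : Bool :=
  match assocGet? dataFromDF "samples" with
  | none => false   -- KeyError in Python: excluded by Pre_
  | some samples => (assocGet? samples lead).isSome

def getLeadsAsDF_alt (leads : List String) (dataFromDF : List (String × List (String × List Int))) : Option (List (List Int)) :=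
  if leads.all (hasLead dataFromDF) then
    -- B pass 2: [dataFromDF['samples'][lead][5000:8000] for lead in leads]
    some (leads.map (fun lead =>
      PySem.List.slice ((assocGet? ((assocGet? dataFromDF "samples").getD []) lead).getD [])
        (some 5000) (some 8000)))
  else none

-- ===== PRECONDITION & SPEC =====
-- Pre_ excludes exactly the inputs where Python A raises KeyError: a nonempty leads list
-- with no 'samples' key in dataFromDF (B raises there too).
def Pre_getLeadsAsDF (leads : List String) (dataFromDF : List (String × List (String × List Int))) : Prop :=
  leads = [] ∨ (assocGet? dataFromDF "samples").isSome = true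
instance (leads : List String) (dataFromDF : List (String × List (String × List Int))) : Decidable (Pre_getLeadsAsDF leads dataFromDF) := by unfold Pre_getLeadsAsDF; infer_instance

def pvWitness_getLeadsAsDF : List String × (List (String × List (String × List Int))) :=
  (["a"], [("samples", [("a", [1, 2, 3]), ("b", [4])])])

def Spec_getLeadsAsDF (leads : List String) (dataFromDF : List (String × List (String × List Int))) (out : Option (List (List Int))) : Prop := out = getLeadsAsDF_alt leads dataFromDF
instance (leads : List String) (dataFromDF : List (String × List (String × List Int))) (out : Option (List (List Int))) : Decidable (Spec_getLeadsAsDF leads dataFromDF out) := by unfold Spec_getLeadsAsDF; infer_instance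

-- ===== CLAIM (what is proved, stated in full; the proofs are below) =====
def Claim_equal_getLeadsAsDF : Prop := ∀ (leads : List String) (dataFromDF : List (String × List (String × List Int))), Dom_getLeadsAsDF leads dataFromDF → Pre_getLeadsAsDF leads dataFromDF → Spec_getLeadsAsDF leads dataFromDF (getLeadsAsDF leads dataFromDF)

-- ===== LEMMAS AND PROOFS =====

theorem goA_spec (dataFromDF : List (String × List (String × List Int)))
    (samples : List (String × List Int))
    (hs : assocGet? dataFromDF "samples" = some samples) :
    ∀ (leads : List String) (acc : List (List Int)),
      goA dataFromDF leads acc =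
        if leads.all (hasLead dataFromDF) then
          some (acc ++ leads.map (fun lead =>
            PySem.List.slice ((assocGet? ((assocGet? dataFromDF "samples").getD []) lead).getD [])
              (some 5000) (some 8000)))
        else none := by
  intro leads
  induction leads with
  | nil => intro acc; simp [goA]
  | cons lead rest ih =>
    intro acc
    simp only [goA, hs, List.all_cons, hasLead]
    cases hv : assocGet? samples lead with
    | none => simp [hv]
    | some v => simp [hs, hv, ih]

theorem getLeadsAsDF_spec : Claim_equal_getLeadsAsDF := by
  intro leads dataFromDF _hdom hpre
  unfold Spec_getLeadsAsDF
  cases leads with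
  | nil => simp [getLeadsAsDF, goA, getLeadsAsDF_alt]
  | cons lead rest =>
    rcases hpre with h | h
    · exact absurd h (by simp)
    · rcases Option.isSome_iff_exists.mp h with ⟨samples, hs⟩
      rw [getLeadsAsDF, goA_spec dataFromDF samples hs, getLeadsAsDF_alt]
      simp
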